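-- pv_equiv track=rewrite | github.com/BBVA/purescript-google-apps | generator/render.py | js_to_ps
-- ===== SOURCE A (Python) =====
-- def js_to_ps(value):
--     if value.endswith('[]'):
--         return f"(Array {js_to_ps(value[:-2])})"
--     else:
--         return {
--             'void': 'Unit',
--             'Integer': 'Int',
--             'Object': 'Foreign',
--             'Date': 'JSDate'
--         }.get(value, value)
-- ===== SOURCE B (Python) =====
-- def js_to_ps(value):
--     depth = 0
--     while value.endswith('[]'):
--         value = value[:-2]
--         depth += 1
--     base = {
--         'void': 'Unit',
--         'Integer': 'Int',
--         'Object': 'Foreign',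
--         'Date': 'JSDate'
--     }.get(value, value)
--     for _ in range(depth):
--         base = f"(Array {base})"
--     return base
-- ===== Notes on version B (the rewrite author's own statement) =====
-- stated objective: alternative
-- what changed: Replaces the recursion over the array-suffix markers by a flat strip-and-count loop, a single dict lookup on the fully stripped base name, and an iterative wrap applying the Array constructor depth times.
import Mathlib
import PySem

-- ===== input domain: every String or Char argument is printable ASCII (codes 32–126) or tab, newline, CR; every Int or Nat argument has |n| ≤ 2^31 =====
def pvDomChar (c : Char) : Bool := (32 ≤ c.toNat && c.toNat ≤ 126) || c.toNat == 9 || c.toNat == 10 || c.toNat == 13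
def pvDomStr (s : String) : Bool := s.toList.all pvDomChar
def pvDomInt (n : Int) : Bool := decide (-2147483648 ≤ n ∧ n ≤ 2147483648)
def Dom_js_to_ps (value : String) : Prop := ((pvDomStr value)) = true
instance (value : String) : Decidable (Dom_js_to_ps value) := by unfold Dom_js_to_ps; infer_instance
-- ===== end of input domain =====

-- B replaces A's recursion over the '[]' suffix by a strip-and-count loop, one dict lookup, and an iterative wrap (alternative decomposition, same cost class).


-- ===== PORT A =====
-- the dict literal {'void': 'Unit', …}.get(value, value), on code-point lists
def pvLookup (cs : List Char) : List Char :=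
  if cs = "void".toList then "Unit".toList
  else if cs = "Integer".toList then "Int".toList
  else if cs = "Object".toList then "Foreign".toList
  else if cs = "Date".toList then "JSDate".toList
  else cs

-- A's recursion; value[:-2] is cs.take (cs.length - 2) (exact: PySem.List.slice_to_neg_ofNat)
def jsA (cs : List Char) : List Char :=
  if h : PySem.Chars.endswith cs "[]".toList then
    "(Array ".toList ++ jsA (cs.take (cs.length - 2)) ++ ")".toList
  else
    pvLookup cs
termination_by cs.length
decreasing_by
  have h2 : 2 ≤ cs.length := by
    have := (PySem.Chars.endswith_iff cs "[]".toList).mp h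
    simpa using this.length_le
  simp [List.length_take]; omega

def js_to_ps (value : String) : String := String.ofList (jsA value.toList)

-- ===== PORT B =====
-- the while loop: strip trailing '[]' markers, counting depth
def pvStrip (cs : List Char) (depth : Nat) : List Char × Nat :=
  if h : PySem.Chars.endswith cs "[]".toList then
    pvStrip (cs.take (cs.length - 2)) (depth + 1)
  else
    (cs, depth)
termination_by cs.length
decreasing_by
  have h2 : 2 ≤ cs.length := by
    have := (PySem.Chars.endswith_iff cs "[]".toList).mp h
    simpa using this.length_le
  simp [List.length_take]; omega

-- the for loop: wrap base in '(Array …)' depth times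
def pvWrap (n : Nat) (base : List Char) : List Char :=
  match n with
  | 0 => base
  | n + 1 => pvWrap n ("(Array ".toList ++ base ++ ")".toList)

def js_to_ps_alt (value : String) : String :=
  let (b, d) := pvStrip value.toList 0
  String.ofList (pvWrap d (pvLookup b))

-- ===== PRECONDITION & SPEC =====
def Spec_js_to_ps (value : String) (out : String) : Prop := out = js_to_ps_alt value
instance (value : String) (out : String) : Decidable (Spec_js_to_ps value out) := by unfold Spec_js_to_ps; infer_instance

-- ===== CLAIM (what is proved, stated in full; the proofs are below) =====
def Claim_equal_js_to_ps : Prop := ∀ (value : String), Dom_js_to_ps value → Spec_js_to_ps value (js_to_ps value)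

-- ===== LEMMAS AND PROOFS =====
theorem jsA_eq_strip (cs : List Char) (d : Nat) :
    pvWrap (pvStrip cs d).2 (pvLookup (pvStrip cs d).1) = pvWrap d (jsA cs) := by
  induction cs, d using pvStrip.induct with
  | case1 cs d h ih =>
      rw [pvStrip, dif_pos h, jsA, dif_pos h, ih]; rfl
  | case2 cs d h =>
      rw [pvStrip, dif_neg h, jsA, dif_neg h]

-- ===== VERDICT (by name: the statement is the Claim_ definition above) =====
theorem js_to_ps_spec : Claim_equal_js_to_ps := by
  intro value _
  unfold Spec_js_to_ps js_to_ps js_to_ps_alt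
  have h := jsA_eq_strip value.toList 0
  simp only [pvWrap] at h
  rw [← h]
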